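-- pv_equiv track=rewrite | github.com/Stilic/nsi | chap 9/9_11.py | miroir
-- ===== SOURCE A (Python) =====
-- def miroir(chaine: str) -> str:
--     """
--     Fonction qui prend en paramètre une chaîne de caractères et qui la renvoie chiffrée suivant de chiffrement miroir.
--     """
--     assert type(chaine) == str, "chaine doit être une chaîne de caractères"
--     resultat = ""
--     for caractere in chaine:
--         n = ord(caractere)
--         estMinuscule = 96 < n < 123
--         if estMinuscule or 64 < n < 91:
--             if estMinuscule:
--                 n -= 32
--             n = 96 - n
--             if estMinuscule:
--                 n += 32
--             resultat += chr(n)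
--         else:
--             resultat += caractere
--     return resultat
-- ===== SOURCE B (Python) =====
-- _SRC = "abcdefghijklmnopqrstuvwxyzABCDEFGHIJKLMNOPQRSTUVWXYZ"
-- _DST = "".join(chr(160 - ord(c)) if c.islower() else chr(96 - ord(c)) for c in _SRC)
-- _TABLE = str.maketrans(_SRC, _DST)
--
--
-- def miroir(chaine: str) -> str:
--     assert type(chaine) == str, "chaine doit être une chaîne de caractères"
--     return chaine.translate(_TABLE)
-- ===== Notes on version B (the rewrite author's own statement) =====
-- stated objective: faster
-- what changed: Replaces the per-character branch-and-arithmetic loop with string concatenation by a precomputed 52-entry translation table applied in one C-level str.translate pass.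
import Mathlib
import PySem

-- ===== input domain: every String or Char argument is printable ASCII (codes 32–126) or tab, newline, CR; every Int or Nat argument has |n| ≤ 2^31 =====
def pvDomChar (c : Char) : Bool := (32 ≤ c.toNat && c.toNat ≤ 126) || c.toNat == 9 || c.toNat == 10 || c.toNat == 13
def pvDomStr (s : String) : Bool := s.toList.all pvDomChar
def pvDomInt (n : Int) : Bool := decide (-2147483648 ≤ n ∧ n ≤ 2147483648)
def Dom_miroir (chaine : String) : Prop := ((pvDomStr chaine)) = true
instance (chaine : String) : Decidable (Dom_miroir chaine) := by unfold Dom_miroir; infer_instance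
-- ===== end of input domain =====

set_option maxRecDepth 4000


-- B replaces A's per-character branching arithmetic by a precomputed 52-letter
-- translation table applied in a single translate pass (measurably faster at large sizes).

-- ===== PORT A =====
-- one iteration of A's loop: append the (possibly mirrored) character
def miroirStep (res : List Char) (c : Char) : List Char :=
  let n : Int := c.toNat
  let estMinuscule : Bool := decide (96 < n ∧ n < 123)
  if estMinuscule || decide (64 < n ∧ n < 91) then
    let n1 : Int := if estMinuscule then n - 32 else n
    let n2 : Int := 96 - n1
    let n3 : Int := if estMinuscule then n2 + 32 else n2
    res ++ [Char.ofNat n3.toNat]   -- chr(n): n3 is 6..122 here, a valid code point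
  else
    res ++ [c]

def miroir (chaine : String) : String :=
  String.ofList (chaine.toList.foldl miroirStep [])

-- ===== PORT B =====
-- _SRC, as its character list
def pvSrc : List Char :=
  ['a','b','c','d','e','f','g','h','i','j','k','l','m','n','o','p','q','r','s','t','u','v','w','x','y','z',
   'A','B','C','D','E','F','G','H','I','J','K','L','M','N','O','P','Q','R','S','T','U','V','W','X','Y','Z']

-- _DST: the generator expression over _SRC
def pvDst : List Char :=
  pvSrc.map (fun c => if PySem.Chars.islower c then Char.ofNat (160 - c.toNat) else Char.ofNat (96 - c.toNat))

-- str.maketrans(_SRC, _DST): code point -> replacement character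
def pvTable : PySem.Dict Nat Char :=
  ((pvSrc.map Char.toNat).zip pvDst).foldl (fun d kv => d.insert kv.1 kv.2) PySem.Dict.empty

-- chaine.translate(_TABLE): unmapped code points pass through unchanged
def miroir_alt (chaine : String) : String :=
  String.ofList (chaine.toList.map (fun c => pvTable.getD c.toNat c))

-- ===== PRECONDITION & SPEC =====
def Spec_miroir (chaine : String) (out : String) : Prop := out = miroir_alt chaine
instance (chaine : String) (out : String) : Decidable (Spec_miroir chaine out) := by unfold Spec_miroir; infer_instance

-- ===== CLAIM (what is proved, stated in full; the proofs are below) =====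
def Claim_equal_miroir : Prop := ∀ (chaine : String), Dom_miroir chaine → Spec_miroir chaine (miroir chaine)

-- ===== LEMMAS AND PROOFS =====

-- A's per-character result, as a function
def fA (c : Char) : Char :=
  let n : Int := c.toNat
  let estMinuscule : Bool := decide (96 < n ∧ n < 123)
  if estMinuscule || decide (64 < n ∧ n < 91) then
    let n1 : Int := if estMinuscule then n - 32 else n
    let n2 : Int := 96 - n1
    let n3 : Int := if estMinuscule then n2 + 32 else n2
    Char.ofNat n3.toNat
  else c

-- B's value for one source character
def pvG (c : Char) : Char :=
  if PySem.Chars.islower c then Char.ofNat (160 - c.toNat) else Char.ofNat (96 - c.toNat)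

theorem miroirStep_eq (res : List Char) (c : Char) : miroirStep res c = res ++ [fA c] := by
  simp only [miroirStep, fA]
  split <;> rfl

theorem foldl_miroirStep (cs : List Char) (acc : List Char) :
    cs.foldl miroirStep acc = acc ++ cs.map fA := by
  induction cs generalizing acc with
  | nil => simp
  | cons c cs ih => simp [miroirStep_eq, ih]

theorem table_eq :
    pvTable = pvSrc.foldl (fun d c => d.insert c.toNat (pvG c)) PySem.Dict.empty := by
  unfold pvTable pvDst
  rw [List.zip_map', List.foldl_map]
  rfl

theorem src_keys : pvSrc.map Char.toNat =
    [97,98,99,100,101,102,103,104,105,106,107,108,109,110,111,112,113,114,115,116,117,118,119,120,121,122,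
     65,66,67,68,69,70,71,72,73,74,75,76,77,78,79,80,81,82,83,84,85,86,87,88,89,90] := by
  decide

theorem src_keys_nodup : (pvSrc.map Char.toNat).Nodup := by decide

theorem mem_src_lower : ∀ n, n < 123 → 97 ≤ n → Char.ofNat n ∈ pvSrc := by decide

theorem mem_src_upper : ∀ n, n < 91 → 65 ≤ n → Char.ofNat n ∈ pvSrc := by decide

theorem islower_iff (c : Char) : PySem.Chars.islower c = true ↔ (97 ≤ c.toNat ∧ c.toNat ≤ 122) := by
  simp only [PySem.Chars.islower, Char.le_def, UInt32.le_iff_toNat_le, Bool.and_eq_true,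
    decide_eq_true_eq]
  exact Iff.rfl

theorem getD_foldl_not_mem (g : Char → Char) (cs : List Char) (d : PySem.Dict Nat Char)
    (k : Nat) (d0 : Char) (h : k ∉ cs.map Char.toNat) :
    (cs.foldl (fun d c => d.insert c.toNat (g c)) d).getD k d0 = d.getD k d0 := by
  induction cs generalizing d with
  | nil => rfl
  | cons a cs ih =>
    simp only [List.map_cons, List.mem_cons, not_or] at h
    simp only [List.foldl_cons]
    rw [ih _ h.2]
    apply PySem.Dict.getD_insert_of_ne
    exact h.1

theorem getD_foldl_mem (g : Char → Char) (c : Char) (d0 : Char) :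
    ∀ (cs : List Char) (d : PySem.Dict Nat Char), c ∈ cs → (cs.map Char.toNat).Nodup →
      (cs.foldl (fun d c => d.insert c.toNat (g c)) d).getD c.toNat d0 = g c := by
  intro cs
  induction cs with
  | nil => intro d hc _; cases hc
  | cons a cs ih =>
    intro d hc hn
    simp only [List.map_cons, List.nodup_cons] at hn
    simp only [List.foldl_cons]
    rcases List.mem_cons.mp hc with h | h
    · subst h
      rw [getD_foldl_not_mem g cs _ c.toNat d0 hn.1, PySem.Dict.getD_insert_self]
    · exact ih _ h hn.2

theorem fA_eq_table (c : Char) : fA c = pvTable.getD c.toNat c := by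
  rw [table_eq]
  by_cases hlo : 97 ≤ c.toNat ∧ c.toNat ≤ 122
  · have hmem : c ∈ pvSrc := by
      have h := mem_src_lower c.toNat (by omega) hlo.1
      rwa [Char.ofNat_toNat] at h
    rw [getD_foldl_mem pvG c c pvSrc _ hmem src_keys_nodup]
    have hmin : decide (96 < (c.toNat : Int) ∧ (c.toNat : Int) < 123) = true := by
      simp only [decide_eq_true_eq]; omega
    have hil : PySem.Chars.islower c = true := (islower_iff c).mpr hlo
    simp only [fA, pvG, hmin, Bool.true_or, if_true, hil]
    congr 1
    omega
  · by_cases hup : 65 ≤ c.toNat ∧ c.toNat ≤ 90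
    · have hmem : c ∈ pvSrc := by
        have h := mem_src_upper c.toNat (by omega) hup.1
        rwa [Char.ofNat_toNat] at h
      rw [getD_foldl_mem pvG c c pvSrc _ hmem src_keys_nodup]
      have h1n : ¬(96 < c.toNat ∧ c.toNat < 123) := by omega
      have h2n : 64 < c.toNat ∧ c.toNat < 91 := by omega
      have hil : PySem.Chars.islower c = false := by
        rw [← Bool.not_eq_true, islower_iff]; omega
      simp [fA, pvG, h1n, h2n, hil]
    · have hnot : c.toNat ∉ pvSrc.map Char.toNat := by
        rw [src_keys]
        intro h
        simp only [List.mem_cons, List.not_mem_nil, or_false] at h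
        omega
      rw [getD_foldl_not_mem pvG pvSrc _ c.toNat c hnot]
      have h1n : ¬(96 < c.toNat ∧ c.toNat < 123) := by omega
      have h2n : ¬(64 < c.toNat ∧ c.toNat < 91) := by omega
      simp [fA, h1n, h2n]

theorem miroir_eq_alt (chaine : String) : miroir chaine = miroir_alt chaine := by
  unfold miroir miroir_alt
  rw [foldl_miroirStep, List.nil_append]
  exact congrArg String.ofList (List.map_congr_left (fun c _ => fA_eq_table c))

-- ===== VERDICT (by name: the statement is the Claim_ definition above) =====
theorem miroir_spec : Claim_equal_miroir := by
  intro chaine _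
  exact miroir_eq_alt chaine
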